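-- pv_equiv track=rewrite | github.com/Gravitar64/Advent-of-Code-2016 | Tag_01.py | solve
-- ===== SOURCE A (Python) =====
-- def solve(puzzle):
--   pos, pos2, rcht, sol2 = [0,0], [0,0], [0,-1], None
--   visit = set()
--   for rot, anz in puzzle:
--     x,y = rcht
--     rcht = [-y,x] if rot == 'R' else [y,-x]
--     pos = [a+b*anz for a,b in zip(pos,rcht)]
--     for _ in range(anz):
--       pos2 = tuple(a+b for a,b in zip(pos2,rcht))
--       if not sol2 and pos2 in visit: sol2 = pos2
--       visit.add(pos2)
--   return sum([abs(a) for a in pos]), sum([abs(a) for a in sol2])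
-- ===== SOURCE B (Python) =====
-- def _axis_min_k(p, d, L, lo, hi):
--     # least k in [1, L] with lo <= p + k*d <= hi, else None (d is +1 or -1)
--     if d == 1:
--         k = lo - p if lo - p > 1 else 1
--         return k if k <= L and k <= hi - p else None
--     else:
--         k = p - hi if p - hi > 1 else 1
--         return k if k <= L and k <= p - lo else None
--
--
-- def _seg_min_k(qx, qy, dx, dy, L, sx, sy, ux, uy, M):
--     # least k in [1, L] with (qx+k*dx, qy+k*dy) on {(sx+m*ux, sy+m*uy) : 1 <= m <= M}
--     if dx != 0:
--         if ux != 0: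
--             if qy != sy:
--                 return None
--             lo, hi = (sx + ux, sx + M * ux) if ux == 1 else (sx + M * ux, sx + ux)
--             return _axis_min_k(qx, dx, L, lo, hi)
--         else:
--             lo, hi = (sy + uy, sy + M * uy) if uy == 1 else (sy + M * uy, sy + uy)
--             if not (lo <= qy <= hi):
--                 return None
--             k = (sx - qx) * dx
--             return k if 1 <= k <= L else None
--     else:
--         if uy != 0:
--             if qx != sx:
--                 return None
--             lo, hi = (sy + uy, sy + M * uy) if uy == 1 else (sy + M * uy, sy + uy)
--             return _axis_min_k(qy, dy, L, lo, hi)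
--         else:
--             lo, hi = (sx + ux, sx + M * ux) if ux == 1 else (sx + M * ux, sx + ux)
--             if not (lo <= qx <= hi):
--                 return None
--             k = (sy - qy) * dy
--             return k if 1 <= k <= L else None
--
--
-- def solve(puzzle):
--     x = y = 0
--     dx, dy = 0, -1
--     qx = qy = 0
--     segs = []          # (sx, sy, ux, uy, M): points sx+m*ux, sy+m*uy for m in 1..M
--     best = None
--     for rot, anz in puzzle:
--         dx, dy = (-dy, dx) if rot == 'R' else (dy, -dx)
--         x += dx * anz
--         y += dy * anz
--         if best is None:
--             L = anz if anz > 0 else 0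
--             if L > 0:
--                 k = None
--                 for seg in segs:
--                     c = _seg_min_k(qx, qy, dx, dy, L, *seg)
--                     if c is not None and (k is None or c < k):
--                         k = c
--                 if k is not None:
--                     best = (qx + k * dx, qy + k * dy)
--                 segs.append((qx, qy, dx, dy, L))
--                 qx += L * dx
--                 qy += L * dy
--     return abs(x) + abs(y), abs(best[0]) + abs(best[1])
-- ===== Notes on version B (the rewrite author's own statement) =====
-- stated objective: faster
-- what changed: B replaces A's step-by-step walk with a global visited-point set by segment geometry: each instruction's segment is intersected (interval arithmetic) against all previously walked segments, taking the earliest crossing, so cost is O(n^2) in the number of instructions instead of O(total distance walked).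
import Mathlib
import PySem

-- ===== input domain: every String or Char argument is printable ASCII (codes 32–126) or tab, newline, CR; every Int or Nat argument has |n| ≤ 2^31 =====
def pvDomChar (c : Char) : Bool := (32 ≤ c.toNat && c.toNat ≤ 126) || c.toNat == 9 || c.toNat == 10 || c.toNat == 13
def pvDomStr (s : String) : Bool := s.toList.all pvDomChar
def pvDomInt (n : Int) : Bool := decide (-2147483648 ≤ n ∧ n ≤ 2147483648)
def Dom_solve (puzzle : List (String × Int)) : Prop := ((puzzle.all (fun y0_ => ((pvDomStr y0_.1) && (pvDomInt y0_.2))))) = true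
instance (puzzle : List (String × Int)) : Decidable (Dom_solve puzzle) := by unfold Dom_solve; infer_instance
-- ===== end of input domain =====

-- B replaces A's per-step walk (visited-point set) by per-instruction segment intersection
-- (earliest crossing of the new segment with each previously walked segment): faster by the
-- measured asymptotic change from O(total distance) to O(n^2) in instruction count.

-- ===== PORT A =====
-- inner 'for _ in range(anz)' loop of A: state (pos2, visit, sol2)
def solveInner : Nat → (Int × Int) → (Int × Int) → PySem.Set (Int × Int) → Option (Int × Int) →
    (Int × Int) × PySem.Set (Int × Int) × Option (Int × Int)
  | 0, pos2, _, visit, sol2 => (pos2, visit, sol2)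
  | n + 1, pos2, rcht, visit, sol2 =>
    let p : Int × Int := (pos2.1 + rcht.1, pos2.2 + rcht.2)
    let sol2' := if sol2 = none ∧ PySem.Set.contains visit p = true then some p else sol2
    solveInner n p rcht (PySem.Set.add visit p) sol2'

-- outer 'for rot, anz in puzzle' loop of A
def solveGo : List (String × Int) → (Int × Int) → (Int × Int) → (Int × Int) →
    PySem.Set (Int × Int) → Option (Int × Int) → (Int × Int) × Option (Int × Int)
  | [], pos, _, _, _, sol2 => (pos, sol2)
  | (rot, anz) :: rest, pos, pos2, rcht, visit, sol2 =>
    let d : Int × Int := if rot == "R" then (-rcht.2, rcht.1) else (rcht.2, -rcht.1)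
    let pos' : Int × Int := (pos.1 + d.1 * anz, pos.2 + d.2 * anz)
    let r := solveInner anz.toNat pos2 d visit sol2
    solveGo rest pos' r.1 d r.2.1 r.2.2

def solve (puzzle : List (String × Int)) : Int × Int :=
  let r := solveGo puzzle (0, 0) (0, 0) (0, -1) PySem.Set.empty none
  (|r.1.1| + |r.1.2|,
    match r.2 with
    | some s => |s.1| + |s.2|
    | none => 0)   -- Python raises TypeError here (sol2 is None); excluded by Pre_solve

-- ===== PORT B =====
-- least k in [1,L] with lo ≤ p + k*d ≤ hi (d = ±1), else none
def axisMinK (p d L lo hi : Int) : Option Int :=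
  if d = 1 then
    let k := if lo - p > 1 then lo - p else 1
    if k ≤ L ∧ k ≤ hi - p then some k else none
  else
    let k := if p - hi > 1 then p - hi else 1
    if k ≤ L ∧ k ≤ p - lo then some k else none

-- least k in [1,L] with (qx+k*dx, qy+k*dy) among {(sx+m*ux, sy+m*uy) : 1 ≤ m ≤ M}
def segMinK (qx qy dx dy L sx sy ux uy M : Int) : Option Int :=
  if dx ≠ 0 then
    if ux ≠ 0 then
      if qy ≠ sy then none
      else
        let lohi := if ux = 1 then (sx + ux, sx + M * ux) else (sx + M * ux, sx + ux)
        axisMinK qx dx L lohi.1 lohi.2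
    else
      let lohi := if uy = 1 then (sy + uy, sy + M * uy) else (sy + M * uy, sy + uy)
      if lohi.1 ≤ qy ∧ qy ≤ lohi.2 then
        let k := (sx - qx) * dx
        if 1 ≤ k ∧ k ≤ L then some k else none
      else none
  else
    if uy ≠ 0 then
      if qx ≠ sx then none
      else
        let lohi := if uy = 1 then (sy + uy, sy + M * uy) else (sy + M * uy, sy + uy)
        axisMinK qy dy L lohi.1 lohi.2
    else
      let lohi := if ux = 1 then (sx + ux, sx + M * ux) else (sx + M * ux, sx + ux)
      if lohi.1 ≤ qx ∧ qx ≤ lohi.2 then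
        let k := (sy - qy) * dy
        if 1 ≤ k ∧ k ≤ L then some k else none
      else none

-- 'for seg in segs' loop of B: running minimum candidate k
def scanSegs (qx qy dx dy L : Int) :
    List (Int × Int × Int × Int × Int) → Option Int → Option Int
  | [], k => k
  | s :: rest, k =>
    let c := segMinK qx qy dx dy L s.1 s.2.1 s.2.2.1 s.2.2.2.1 s.2.2.2.2
    let k' := match c, k with
      | some c0, some k0 => if c0 < k0 then some c0 else some k0
      | some c0, none => some c0
      | none, k0 => k0
    scanSegs qx qy dx dy L rest k'

-- 'for rot, anz in puzzle' loop of B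
def solveAltGo : List (String × Int) → Int → Int → Int → Int → Int → Int →
    List (Int × Int × Int × Int × Int) → Option (Int × Int) → (Int × Int) × Option (Int × Int)
  | [], x, y, _, _, _, _, _, best => ((x, y), best)
  | (rot, anz) :: rest, x, y, dx, dy, qx, qy, segs, best =>
    let d : Int × Int := if rot == "R" then (-dy, dx) else (dy, -dx)
    let x' := x + d.1 * anz
    let y' := y + d.2 * anz
    match best with
    | some b => solveAltGo rest x' y' d.1 d.2 qx qy segs (some b)
    | none =>
      let L := if anz > 0 then anz else 0
      if L > 0 then
        let k := scanSegs qx qy d.1 d.2 L segs none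
        let best' := match k with
          | some k0 => some (qx + k0 * d.1, qy + k0 * d.2)
          | none => none
        solveAltGo rest x' y' d.1 d.2 (qx + L * d.1) (qy + L * d.2)
          (segs ++ [(qx, qy, d.1, d.2, L)]) best'
      else
        solveAltGo rest x' y' d.1 d.2 qx qy segs none

def solve_alt (puzzle : List (String × Int)) : Int × Int :=
  let r := solveAltGo puzzle 0 0 0 (-1) 0 0 [] none
  (|r.1.1| + |r.1.2|,
    match r.2 with
    | some s => |s.1| + |s.2|
    | none => 0)   -- Python raises TypeError here (best is None); excluded by Pre_solve

-- ===== PRECONDITION & SPEC =====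
-- the unit-wide bounding boxes (xlo, xhi, ylo, yhi) of the walked segments of the puzzle
-- (start point of each segment excluded, zero-length segments dropped)
def preSegs : List (String × Int) → (Int × Int) → (Int × Int) → List (Int × Int × Int × Int)
  | [], _, _ => []
  | (rot, anz) :: rest, d, p =>
    let d' : Int × Int := if rot == "R" then (-d.2, d.1) else (d.2, -d.1)
    let L : Int := (anz.toNat : Int)
    (if L = 0 then [] else
      [(min (p.1 + d'.1) (p.1 + L * d'.1), max (p.1 + d'.1) (p.1 + L * d'.1),
        min (p.2 + d'.2) (p.2 + L * d'.2), max (p.2 + d'.2) (p.2 + L * d'.2))])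
      ++ preSegs rest d' (p.1 + L * d'.1, p.2 + L * d'.2)

def boxDisjoint (a b : Int × Int × Int × Int) : Prop :=
  a.2.1 < b.1 ∨ b.2.1 < a.1 ∨ a.2.2.2 < b.2.2.1 ∨ b.2.2.2 < a.2.2.1

-- Pre_ excludes exactly the puzzles whose walk never revisits a point (equivalently: no two of
-- its segment boxes meet): there Python A (and Python B) raise TypeError on the final sum over
-- None — no value is returned.
def Pre_solve (puzzle : List (String × Int)) : Prop :=
  ¬ (preSegs puzzle (0, -1) (0, 0)).Pairwise boxDisjoint
instance (puzzle : List (String × Int)) : Decidable (Pre_solve puzzle) := by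
  unfold Pre_solve boxDisjoint; infer_instance

def pvWitness_solve : (List (String × Int)) := [("R", 3), ("R", 1), ("R", 1), ("R", 2)]

def Spec_solve (puzzle : List (String × Int)) (out : Int × Int) : Prop := out = solve_alt puzzle
instance (puzzle : List (String × Int)) (out : Int × Int) : Decidable (Spec_solve puzzle out) := by
  unfold Spec_solve; infer_instance

-- ===== CLAIM (what is proved, stated in full; the proofs are below) =====
def Claim_equal_solve : Prop := ∀ (puzzle : List (String × Int)), Dom_solve puzzle →
  Pre_solve puzzle → Spec_solve puzzle (solve puzzle)

-- ===== LEMMAS AND PROOFS =====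

-- a direction is one of the four unit vectors
def unitV (d : Int × Int) : Prop := d = (0, 1) ∨ d = (0, -1) ∨ d = (1, 0) ∨ d = (-1, 0)

-- a stored segment is well-formed: unit direction, positive length
def goodSeg (s : Int × Int × Int × Int × Int) : Prop :=
  unitV (s.2.2.1, s.2.2.2.1) ∧ 1 ≤ s.2.2.2.2

-- point k steps along the new segment hits stored segment s
abbrev segHit (qx qy dx dy : Int) (s : Int × Int × Int × Int × Int) (k : Int) : Prop :=
  ∃ m, 1 ≤ m ∧ m ≤ s.2.2.2.2 ∧ qx + k * dx = s.1 + m * s.2.2.1 ∧ qy + k * dy = s.2.1 + m * s.2.2.2.1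

-- o is (as Option) the least k in [1,L] satisfying P
def LeastOpt (L : Int) (P : Int → Prop) : Option Int → Prop
  | none => ∀ k, 1 ≤ k → k ≤ L → ¬ P k
  | some k => 1 ≤ k ∧ k ≤ L ∧ P k ∧ ∀ j, 1 ≤ j → j < k → ¬ P j

lemma leastOpt_iff {L : Int} {P Q : Int → Prop} {o : Option Int}
    (h : ∀ k, 1 ≤ k → k ≤ L → (P k ↔ Q k)) (ho : LeastOpt L P o) : LeastOpt L Q o := by
  cases o with
  | none => intro k h1 h2 hq; exact ho k h1 h2 ((h k h1 h2).2 hq)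
  | some k =>
    obtain ⟨h1, h2, h3, h4⟩ := ho
    exact ⟨h1, h2, (h k h1 h2).1 h3, fun j hj1 hj2 hq =>
      h4 j hj1 hj2 ((h j hj1 (le_trans (le_of_lt hj2) h2)).2 hq)⟩

lemma leastOpt_some_of {L : Int} {P : Int → Prop} {k : Int} (h1 : 1 ≤ k) (h2 : k ≤ L)
    (h3 : P k) (h4 : ∀ j, 1 ≤ j → j < k → ¬ P j) : LeastOpt L P (some k) := ⟨h1, h2, h3, h4⟩

lemma segHit_intro (qx qy dx dy sx sy ux uy M k : Int)
    (h1 : 1 ≤ (qx + k * dx - sx) * ux + (qy + k * dy - sy) * uy)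
    (h2 : (qx + k * dx - sx) * ux + (qy + k * dy - sy) * uy ≤ M)
    (h3 : qx + k * dx = sx + ((qx + k * dx - sx) * ux + (qy + k * dy - sy) * uy) * ux)
    (h4 : qy + k * dy = sy + ((qx + k * dx - sx) * ux + (qy + k * dy - sy) * uy) * uy) :
    segHit qx qy dx dy (sx, sy, ux, uy, M) k := ⟨_, h1, h2, h3, h4⟩

lemma segMinK_least (qx qy dx dy L sx sy ux uy M : Int)
    (hd : unitV (dx, dy)) (hu : unitV (ux, uy)) (_hM : 1 ≤ M) :
    LeastOpt L (fun k => segHit qx qy dx dy (sx, sy, ux, uy, M) k)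
      (segMinK qx qy dx dy L sx sy ux uy M) := by
  rcases hd with h | h | h | h <;> rw [Prod.mk.injEq] at h <;> obtain ⟨rfl, rfl⟩ := h <;>
    (rcases hu with h' | h' | h' | h' <;> rw [Prod.mk.injEq] at h' <;> obtain ⟨rfl, rfl⟩ := h' <;>
      (simp only [segMinK, axisMinK]; norm_num; split_ifs <;>
        first
        | (rintro k hk1 hk2 ⟨m, hm1, hm2, hm3, hm4⟩;
           (try dsimp only at hm2 hm3 hm4); omega)
        | (refine leastOpt_some_of ?_ ?_ ?_ ?_ <;>
            first
            | omega
            | (apply segHit_intro <;> ((try dsimp only); omega))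
            | (rintro j hj1 hj2 ⟨m, hm1, hm2, hm3, hm4⟩;
               (try dsimp only at hm2 hm3 hm4); omega))))

def minOpt (o1 o2 : Option Int) : Option Int :=
  match o1, o2 with
  | some c0, some k0 => if c0 < k0 then some c0 else some k0
  | some c0, none => some c0
  | none, k0 => k0

lemma leastOpt_combine {L : Int} {P Q : Int → Prop} {o1 o2 : Option Int}
    (h1 : LeastOpt L P o1) (h2 : LeastOpt L Q o2) :
    LeastOpt L (fun k => P k ∨ Q k) (minOpt o1 o2) := by
  cases o1 with
  | none =>
    cases o2 with
    | none =>
      intro k hk1 hk2 hPQ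
      rcases hPQ with hP | hQ
      · exact h1 k hk1 hk2 hP
      · exact h2 k hk1 hk2 hQ
    | some k0 =>
      obtain ⟨a1, a2, a3, a4⟩ := h2
      exact leastOpt_some_of a1 a2 (Or.inr a3) (fun j hj1 hj2 hPQ => by
        rcases hPQ with hP | hQ
        · exact h1 j hj1 (by omega) hP
        · exact a4 j hj1 hj2 hQ)
  | some c0 =>
    obtain ⟨b1, b2, b3, b4⟩ := h1
    cases o2 with
    | none =>
      exact leastOpt_some_of b1 b2 (Or.inl b3) (fun j hj1 hj2 hPQ => by
        rcases hPQ with hP | hQ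
        · exact b4 j hj1 hj2 hP
        · exact h2 j hj1 (by omega) hQ)
    | some k0 =>
      obtain ⟨a1, a2, a3, a4⟩ := h2
      by_cases hlt : c0 < k0
      · simp only [minOpt, if_pos hlt]
        exact leastOpt_some_of b1 b2 (Or.inl b3) (fun j hj1 hj2 hPQ => by
          rcases hPQ with hP | hQ
          · exact b4 j hj1 hj2 hP
          · exact a4 j hj1 (by omega) hQ)
      · simp only [minOpt, if_neg hlt]
        exact leastOpt_some_of a1 a2 (Or.inr a3) (fun j hj1 hj2 hPQ => by
          rcases hPQ with hP | hQ
          · exact b4 j hj1 (by omega) hP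
          · exact a4 j hj1 hj2 hQ)

lemma scanSegs_least (qx qy dx dy L : Int) (segs : List (Int × Int × Int × Int × Int))
    (hd : unitV (dx, dy)) (hg : ∀ s ∈ segs, goodSeg s) (acc : Option Int) {P : Int → Prop}
    (hacc : LeastOpt L P acc) :
    LeastOpt L (fun k => P k ∨ ∃ s ∈ segs, segHit qx qy dx dy s k)
      (scanSegs qx qy dx dy L segs acc) := by
  induction segs generalizing acc P with
  | nil =>
    simp only [scanSegs]
    refine leastOpt_iff (fun k _ _ => ?_) hacc
    simp
  | cons s rest ih =>
    simp only [scanSegs]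
    have hs := hg s (by simp)
    have hseg : LeastOpt L (fun k => segHit qx qy dx dy s k)
        (segMinK qx qy dx dy L s.1 s.2.1 s.2.2.1 s.2.2.2.1 s.2.2.2.2) :=
      segMinK_least qx qy dx dy L s.1 s.2.1 s.2.2.1 s.2.2.2.1 s.2.2.2.2 hd hs.1 hs.2
    have hcomb := leastOpt_combine hseg hacc
    have hrest := ih (fun t ht => hg t (by simp [ht])) _ hcomb
    refine leastOpt_iff (fun k _ _ => ?_) hrest
    constructor
    · rintro ((hH | hP) | ⟨t, ht, hh⟩)
      · exact Or.inr ⟨s, by simp, hH⟩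
      · exact Or.inl hP
      · exact Or.inr ⟨t, by simp [ht], hh⟩
    · rintro (hP | ⟨t, ht, hh⟩)
      · exact Or.inl (Or.inr hP)
      · rcases List.mem_cons.mp ht with rfl | ht'
        · exact Or.inl (Or.inl hh)
        · exact Or.inr ⟨t, ht', hh⟩

-- A's inner loop keeps sol2 once set
lemma solveInner_sol2_some (n : Nat) (q d : Int × Int) (visit : PySem.Set (Int × Int))
    (s : Int × Int) : (solveInner n q d visit (some s)).2.2 = some s := by
  induction n generalizing q visit with
  | zero => rfl
  | succ n ih => simpa [solveInner] using ih _ _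

lemma unit_cancel (d : Int × Int) (hd : unitV d) (a b : Int)
    (h1 : a * d.1 = b * d.1) (h2 : a * d.2 = b * d.2) : a = b := by
  rcases hd with h | h | h | h <;> subst h <;> dsimp only at h1 h2 <;> omega

-- going n steps with no hit: full characterisation of the resulting state
lemma solveInner_no_hit (n : Nat) (q d : Int × Int) (visit : PySem.Set (Int × Int))
    (hd : unitV d)
    (h : ∀ k : Int, 1 ≤ k → k ≤ (n : Int) → (q.1 + k * d.1, q.2 + k * d.2) ∉ visit) :
    (solveInner n q d visit none).1 = (q.1 + n * d.1, q.2 + n * d.2) ∧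
    (solveInner n q d visit none).2.2 = none ∧
    ∀ p, p ∈ (solveInner n q d visit none).2.1 ↔
      p ∈ visit ∨ ∃ k : Int, 1 ≤ k ∧ k ≤ (n : Int) ∧ p = (q.1 + k * d.1, q.2 + k * d.2) := by
  induction n generalizing q visit with
  | zero =>
    refine ⟨by simp [solveInner], rfl, fun p => ?_⟩
    simp only [solveInner]
    constructor
    · exact fun hp => Or.inl hp
    · rintro (hp | ⟨k, hk1, hk2, rfl⟩)
      · exact hp
      · exfalso; omega
  | succ n ih =>
    have hp1 : (q.1 + d.1, q.2 + d.2) ∉ visit := by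
      have := h 1 (by omega) (by push_cast; omega)
      simpa using this
    have hh : ∀ k : Int, 1 ≤ k → k ≤ (n : Int) →
        ((q.1 + d.1) + k * d.1, (q.2 + d.2) + k * d.2) ∉
          PySem.Set.add visit (q.1 + d.1, q.2 + d.2) := by
      intro k hk1 hk2
      rw [PySem.Set.mem_add]
      push_neg
      constructor
      · have hpt : ((q.1 + d.1) + k * d.1, (q.2 + d.2) + k * d.2)
            = (q.1 + (k + 1) * d.1, q.2 + (k + 1) * d.2) := by
          rw [Prod.mk.injEq]; constructor <;> ring
        rw [hpt]
        exact h (k + 1) (by omega) (by push_cast; omega)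
      · intro heq
        rw [Prod.mk.injEq] at heq
        have := unit_cancel d hd k 0 (by linear_combination heq.1) (by linear_combination heq.2)
        omega
    simp only [solveInner]
    rw [if_neg (show ¬(True ∧ PySem.Set.contains visit (q.1 + d.1, q.2 + d.2) = true) from
      fun hc => hp1 ((PySem.Set.contains_iff _ _).mp hc.2))]
    obtain ⟨e1, e2, e3⟩ := ih (q.1 + d.1, q.2 + d.2)
      (PySem.Set.add visit (q.1 + d.1, q.2 + d.2)) hh
    refine ⟨?_, e2, ?_⟩
    · rw [e1, Prod.mk.injEq]; constructor <;> (push_cast; ring)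
    · intro p
      rw [e3 p, PySem.Set.mem_add]
      constructor
      · rintro ((hp | rfl) | ⟨k, hk1, hk2, rfl⟩)
        · exact Or.inl hp
        · refine Or.inr ⟨1, by omega, by push_cast; omega, ?_⟩
          rw [Prod.mk.injEq]; constructor <;> ring
        · refine Or.inr ⟨k + 1, by omega, by push_cast; omega, ?_⟩
          rw [Prod.mk.injEq]; constructor <;> ring
      · rintro (hp | ⟨k, hk1, hk2, rfl⟩)
        · exact Or.inl (Or.inl hp)
        · by_cases hk : k = 1
          · subst hk
            refine Or.inl (Or.inr ?_)
            rw [Prod.mk.injEq]; constructor <;> ring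
          · refine Or.inr ⟨k - 1, by omega, by push_cast at hk2 ⊢; omega, ?_⟩
            rw [Prod.mk.injEq]; constructor <;> ring

-- going n steps with a least hit k0: sol2 becomes the hit point
lemma solveInner_hit (n : Nat) (q d : Int × Int) (visit : PySem.Set (Int × Int))
    (hd : unitV d) (k0 : Int) (h1 : 1 ≤ k0) (h2 : k0 ≤ (n : Int))
    (h3 : (q.1 + k0 * d.1, q.2 + k0 * d.2) ∈ visit)
    (h4 : ∀ j : Int, 1 ≤ j → j < k0 → (q.1 + j * d.1, q.2 + j * d.2) ∉ visit) :
    (solveInner n q d visit none).2.2 = some (q.1 + k0 * d.1, q.2 + k0 * d.2) := by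
  induction n generalizing q visit k0 with
  | zero => exfalso; omega
  | succ n ih =>
    by_cases hp : (q.1 + d.1, q.2 + d.2) ∈ visit
    · have hk0 : k0 = 1 := by
        by_contra hne
        refine h4 1 (by omega) (by omega) ?_
        simpa using hp
      subst hk0
      simp only [solveInner]
      rw [if_pos (show True ∧ PySem.Set.contains visit (q.1 + d.1, q.2 + d.2) = true from
        ⟨trivial, (PySem.Set.contains_iff _ _).mpr hp⟩), solveInner_sol2_some]
      simp
    · have hk0ne : k0 ≠ 1 := by
        intro e; subst e; exact hp (by simpa using h3)
      have h3' : ((q.1 + d.1) + (k0 - 1) * d.1, (q.2 + d.2) + (k0 - 1) * d.2) ∈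
          PySem.Set.add visit (q.1 + d.1, q.2 + d.2) := by
        rw [PySem.Set.mem_add]
        left
        have hpt : ((q.1 + d.1) + (k0 - 1) * d.1, (q.2 + d.2) + (k0 - 1) * d.2)
            = (q.1 + k0 * d.1, q.2 + k0 * d.2) := by
          rw [Prod.mk.injEq]; constructor <;> ring
        rw [hpt]; exact h3
      have h4' : ∀ j : Int, 1 ≤ j → j < k0 - 1 →
          ((q.1 + d.1) + j * d.1, (q.2 + d.2) + j * d.2) ∉
            PySem.Set.add visit (q.1 + d.1, q.2 + d.2) := by
        intro j hj1 hj2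
        rw [PySem.Set.mem_add]
        push_neg
        constructor
        · have hpt : ((q.1 + d.1) + j * d.1, (q.2 + d.2) + j * d.2)
              = (q.1 + (j + 1) * d.1, q.2 + (j + 1) * d.2) := by
            rw [Prod.mk.injEq]; constructor <;> ring
          rw [hpt]
          exact h4 (j + 1) (by omega) (by omega)
        · intro heq
          rw [Prod.mk.injEq] at heq
          have := unit_cancel d hd j 0 (by linear_combination heq.1) (by linear_combination heq.2)
          omega
      simp only [solveInner]
      rw [if_neg (show ¬(True ∧ PySem.Set.contains visit (q.1 + d.1, q.2 + d.2) = true) from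
        fun hc => hp ((PySem.Set.contains_iff _ _).mp hc.2))]
      rw [ih (q.1 + d.1, q.2 + d.2) (PySem.Set.add visit (q.1 + d.1, q.2 + d.2)) (k0 - 1)
        (by omega) (by push_cast at h2 ⊢; omega) h3' h4']
      congr 1
      rw [Prod.mk.injEq]; constructor <;> ring

lemma turn_unit (d : Int × Int) (rot : String) (hd : unitV d) :
    unitV (if rot == "R" then (-d.2, d.1) else (d.2, -d.1)) := by
  rcases hd with h | h | h | h <;> subst h <;> split <;> simp [unitV]

-- once sol2/best is set, the two loops agree (only pos/x,y and the direction still matter)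
lemma go_some (rest : List (String × Int)) : ∀ (pos q d : Int × Int)
    (visit : PySem.Set (Int × Int)) (s : Int × Int) (qx qy : Int)
    (segs : List (Int × Int × Int × Int × Int)),
    solveGo rest pos q d visit (some s) =
      solveAltGo rest pos.1 pos.2 d.1 d.2 qx qy segs (some s) := by
  induction rest with
  | nil => intro pos q d visit s qx qy segs; rfl
  | cons hd' tl ih =>
    intro pos q d visit s qx qy segs
    obtain ⟨rot, anz⟩ := hd'
    simp only [solveGo, solveAltGo]
    rw [show (solveInner anz.toNat q (if rot == "R" then (-d.2, d.1) else (d.2, -d.1)) visit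
          (some s)).2.2 = some s from solveInner_sol2_some _ _ _ _ _]
    exact ih _ _ _ _ _ _ _ _

-- main invariant-carrying induction while no revisit has been found
lemma go_none (rest : List (String × Int)) : ∀ (pos q d : Int × Int)
    (visit : PySem.Set (Int × Int)) (segs : List (Int × Int × Int × Int × Int)),
    unitV d → (∀ s ∈ segs, goodSeg s) →
    (∀ p : Int × Int, p ∈ visit ↔ ∃ s ∈ segs, ∃ m : Int, 1 ≤ m ∧ m ≤ s.2.2.2.2 ∧
        p = (s.1 + m * s.2.2.1, s.2.1 + m * s.2.2.2.1)) →
    solveGo rest pos q d visit none =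
      solveAltGo rest pos.1 pos.2 d.1 d.2 q.1 q.2 segs none := by
  induction rest with
  | nil => intro pos q d visit segs hd hg hv; rfl
  | cons ins tl ih =>
    intro pos q d visit segs hd hg hv
    obtain ⟨rot, anz⟩ := ins
    simp only [solveGo, solveAltGo]
    set D : Int × Int := if rot == "R" then (-d.2, d.1) else (d.2, -d.1) with hDdef
    have hD : unitV D := turn_unit d rot hd
    by_cases hanz : anz > 0
    · rw [if_pos hanz, if_pos hanz]
      have hnat : ((anz.toNat : Int)) = anz := Int.toNat_of_nonneg (by omega)
      have hpre : LeastOpt anz (fun k => (q.1 + k * D.1, q.2 + k * D.2) ∈ visit)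
          (scanSegs q.1 q.2 D.1 D.2 anz segs none) := by
        have h0 : LeastOpt anz (fun _ => False) (none : Option Int) := fun k _ _ hf => hf
        have hs := scanSegs_least q.1 q.2 D.1 D.2 anz segs hD hg none h0
        refine leastOpt_iff (fun k _ _ => ?_) hs
        rw [hv (q.1 + k * D.1, q.2 + k * D.2)]
        simp only [false_or]
        constructor
        · rintro ⟨t, htm, m, hm1, hm2, hm3, hm4⟩
          exact ⟨t, htm, m, hm1, hm2, by rw [Prod.mk.injEq]; exact ⟨hm3, hm4⟩⟩
        · rintro ⟨t, htm, m, hm1, hm2, heq⟩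
          rw [Prod.mk.injEq] at heq
          exact ⟨t, htm, m, hm1, hm2, heq.1, heq.2⟩
      cases hks : scanSegs q.1 q.2 D.1 D.2 anz segs none with
      | none =>
        rw [hks] at hpre
        obtain ⟨e1, e2, e3⟩ := solveInner_no_hit anz.toNat q D visit hD
          (fun k hk1 hk2 => hpre k hk1 (by rw [hnat] at hk2; exact hk2))
        rw [hnat] at e1 e3
        rw [e1, e2]
        refine ih _ (q.1 + anz * D.1, q.2 + anz * D.2) D _ (segs ++ [(q.1, q.2, D.1, D.2, anz)])
          hD ?_ ?_
        · intro t ht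
          rcases List.mem_append.mp ht with ht' | ht'
          · exact hg t ht'
          · have : t = (q.1, q.2, D.1, D.2, anz) := by simpa using ht'
            subst this
            refine ⟨hD, ?_⟩
            dsimp only
            omega
        · intro p
          rw [e3 p, hv p]
          constructor
          · rintro (⟨t, htm, hrest⟩ | ⟨k, hk1, hk2, rfl⟩)
            · exact ⟨t, List.mem_append.mpr (Or.inl htm), hrest⟩
            · exact ⟨(q.1, q.2, D.1, D.2, anz), List.mem_append.mpr (Or.inr (by simp)),
                k, hk1, hk2, rfl⟩
          · rintro ⟨t, htm, m, hm1, hm2, heq⟩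
            rcases List.mem_append.mp htm with ht' | ht'
            · exact Or.inl ⟨t, ht', m, hm1, hm2, heq⟩
            · have : t = (q.1, q.2, D.1, D.2, anz) := by simpa using ht'
              subst this
              exact Or.inr ⟨m, hm1, hm2, heq⟩
      | some k0 =>
        rw [hks] at hpre
        obtain ⟨hk1, hk2, hk3, hk4⟩ := hpre
        rw [solveInner_hit anz.toNat q D visit hD k0 hk1 (by rw [hnat]; exact hk2) hk3 hk4]
        exact go_some tl _ _ D _ _ _ _ _
    · have ht0 : anz.toNat = 0 := by omega
      rw [ht0, if_neg hanz]
      have h00 : ¬ ((0 : Int) > 0) := by omega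
      rw [if_neg h00]
      exact ih (pos.1 + D.1 * anz, pos.2 + D.2 * anz) q D visit segs hD hg hv

-- ===== VERDICT (by name: the statement is the Claim_ definition above) =====
theorem solve_spec : Claim_equal_solve := by
  intro puzzle _ _
  unfold Spec_solve solve solve_alt
  rw [go_none puzzle (0, 0) (0, 0) (0, -1) PySem.Set.empty [] (by simp [unitV])
    (by simp) (by intro p; simp [PySem.Set.empty])]
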